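-- pv_equiv track=rewrite | github.com/ShuvalovAnthony/ez_python | Maksim/ege/9/20899/20899.py | check
-- ===== SOURCE A (Python) =====
-- def check(row: list):
--     sorted_row = sorted(row)
--
--     povtor = []
--
--     for num in row:
--         if row.count(num) == 2:
--             povtor.append(num)
--
--     return (
--         (sorted_row[-1] < sum(sorted_row[:3])) and
--         (len(povtor) == 2)
--     )
-- ===== SOURCE B (Python) =====
-- def check(row: list):
--     sorted_row = sorted(row)
--     # one linear pass over the sorted list, grouping consecutive equal runs
--     pairs = 0
--     i = 0
--     n = len(sorted_row)
--     while i < n: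
--         j = i
--         while j < n and sorted_row[j] == sorted_row[i]:
--             j += 1
--         if j - i == 2:
--             pairs += 1
--         i = j
--     return sorted_row[-1] < sum(sorted_row[:3]) and pairs == 1
-- ===== Notes on version B (the rewrite author's own statement) =====
-- stated objective: faster
-- what changed: Replaces the quadratic loop of repeated row.count scans with a single run-length pass over the already-sorted list, counting runs of length exactly 2.
import Mathlib
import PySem

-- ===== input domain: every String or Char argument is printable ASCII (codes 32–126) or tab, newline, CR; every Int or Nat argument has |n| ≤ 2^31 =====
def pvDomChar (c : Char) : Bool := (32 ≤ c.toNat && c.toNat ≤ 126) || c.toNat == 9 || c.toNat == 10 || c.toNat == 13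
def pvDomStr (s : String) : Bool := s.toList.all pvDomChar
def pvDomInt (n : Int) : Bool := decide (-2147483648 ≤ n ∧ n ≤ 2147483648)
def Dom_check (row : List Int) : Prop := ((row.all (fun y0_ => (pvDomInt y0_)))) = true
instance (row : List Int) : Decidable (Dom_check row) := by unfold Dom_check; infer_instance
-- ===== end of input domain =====

-- B replaces A's repeated row.count scans by one run-length pass over the sorted list (objective: faster).

-- ===== PORT A =====
def check (row : List Int) : Bool :=
  let sorted_row := PySem.List.sorted row (fun x => x) false
  let povtor := row.foldl (fun acc num => if row.count num == 2 then acc ++ [num] else acc) ([] : List Int)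
  match PySem.List.pyGet? sorted_row (-1) with
  | none => false  -- IndexError on the empty row; excluded by Pre_check
  | some last => decide (last < (PySem.List.slice sorted_row none (some 3)).sum) && (povtor.length == 2)

-- ===== PORT B =====
-- the scan 'j = i; while j < n and sorted_row[j] == sorted_row[i]: j += 1' over the rest of
-- the list is the takeWhile/dropWhile of the current run; run length j - i = takeWhile + 1
def pairsRun : List Int → Nat
  | [] => 0
  | x :: xs =>
      (if (xs.takeWhile (fun y => y == x)).length + 1 = 2 then 1 else 0)
        + pairsRun (xs.dropWhile (fun y => y == x))
  termination_by l => l.length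
  decreasing_by
    have := List.length_dropWhile_le (fun y => y == x) xs
    simp only [List.length_cons]; omega

def check_alt (row : List Int) : Bool :=
  let sorted_row := PySem.List.sorted row (fun x => x) false
  let pairs := pairsRun sorted_row
  match PySem.List.pyGet? sorted_row (-1) with
  | none => false  -- IndexError on the empty row; excluded by Pre_check
  | some last => decide (last < (PySem.List.slice sorted_row none (some 3)).sum) && (pairs == 1)

-- ===== PRECONDITION & SPEC =====
-- Pre_ excludes only the empty list, on which A (and B) raise IndexError when taking the last element.
def Pre_check (row : List Int) : Prop := row ≠ []
instance (row : List Int) : Decidable (Pre_check row) := by unfold Pre_check; infer_instance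
def pvWitness_check : List Int := [1, 1, 2, 3]

def Spec_check (row : List Int) (out : Bool) : Prop := out = check_alt row
instance (row : List Int) (out : Bool) : Decidable (Spec_check row out) := by unfold Spec_check; infer_instance

-- ===== CLAIM (what is proved, stated in full; the proofs are below) =====
def Claim_equal_check : Prop := ∀ (row : List Int), Dom_check row → Pre_check row → Spec_check row (check row)

-- ===== LEMMAS AND PROOFS =====

-- in a ≤-sorted list whose elements are all ≥ x, dropping the leading run of x's drops all x's
theorem not_mem_dropWhile_beq (x : Int) : ∀ (xs : List Int), xs.Pairwise (· ≤ ·) →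
    (∀ y ∈ xs, x ≤ y) → x ∉ xs.dropWhile (fun y => y == x) := by
  intro xs
  induction xs with
  | nil => simp
  | cons a l ih =>
    intro hpw hge
    rw [List.pairwise_cons] at hpw
    by_cases ha : a = x
    · rw [List.dropWhile_cons, if_pos (by simp [ha])]
      exact ih hpw.2 (fun y hy => hge y (List.mem_cons_of_mem a hy))
    · rw [List.dropWhile_cons, if_neg (by simp [ha])]
      intro hx
      rcases List.mem_cons.mp hx with h | h
      · exact ha h.symm
      · have h1 : a ≤ x := hpw.1 x h
        have h2 : x ≤ a := hge a List.mem_cons_self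
        exact ha (le_antisymm h1 h2)

-- a run-length count of pairs in a sorted list, doubled, is the number of elements whose
-- multiplicity is exactly 2
theorem pairsRun_key : ∀ (s : List Int), s.Pairwise (· ≤ ·) →
    (s.filter (fun n => s.count n == 2)).length = 2 * pairsRun s := by
  intro s
  induction s using pairsRun.induct with
  | case1 => intro _; simp [pairsRun]
  | case2 x xs ih =>
    intro hs
    rw [List.pairwise_cons] at hs
    obtain ⟨hge, hpxs⟩ := hs
    set t := xs.takeWhile (fun y => y == x) with htdef
    set d := xs.dropWhile (fun y => y == x) with hddef
    have hxs : t ++ d = xs := List.takeWhile_append_dropWhile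
    have ht : ∀ y ∈ t, y = x := by
      intro y hy
      have := List.mem_takeWhile_imp hy
      simpa using this
    have hd : d.Pairwise (· ≤ ·) :=
      List.Pairwise.sublist (List.dropWhile_sublist _) hpxs
    have hxd : x ∉ d := not_mem_dropWhile_beq x xs hpxs hge
    have hcd : d.count x = 0 := List.count_eq_zero.mpr hxd
    have hct : t.count x = t.length := List.count_eq_length.mpr (fun y hy => (ht y hy).symm)
    have hsx : (x :: xs).count x = t.length + 1 := by
      rw [List.count_cons_self, ← hxs, List.count_append, hct, hcd]
    have hq : ∀ y ∈ d, (x :: xs).count y = d.count y := by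
      intro y hy
      have hyx : y ≠ x := fun he => hxd (he ▸ hy)
      have hty : t.count y = 0 := List.count_eq_zero.mpr (fun hyt => hyx (ht y hyt))
      have h1 : (x :: xs).count y = xs.count y := by simp [Ne.symm hyx]
      rw [h1, ← hxs, List.count_append, hty, Nat.zero_add]
    have hRHS : pairsRun (x :: xs) = (if t.length + 1 = 2 then 1 else 0) + pairsRun d := by
      rw [pairsRun]
    have hcons : x :: xs = x :: (t ++ d) := by rw [hxs]
    have hfd : d.filter (fun n => (x :: (t ++ d)).count n == 2)
        = d.filter (fun n => d.count n == 2) := by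
      apply List.filter_congr
      intro y hy
      have := hq y hy
      rw [← hxs] at this
      rw [this]
    have hft : (t.filter (fun n => (x :: (t ++ d)).count n == 2)).length
        = if t.length + 1 = 2 then t.length else 0 := by
      by_cases hc : t.length + 1 = 2
      · rw [if_pos hc]
        have : t.filter (fun n => (x :: (t ++ d)).count n == 2) = t := by
          apply List.filter_eq_self.mpr
          intro y hy
          rw [ht y hy]
          have hx2 : (x :: (t ++ d)).count x = 2 := by
            rw [List.count_cons_self, List.count_append, hct, hcd]; omega
          simp [hx2]
        rw [this]
      · rw [if_neg hc]
        have : t.filter (fun n => (x :: (t ++ d)).count n == 2) = [] := by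
          apply List.filter_eq_nil_iff.mpr
          intro y hy
          rw [ht y hy]
          have hx2 : (x :: (t ++ d)).count x = t.length + 1 := by
            rw [List.count_cons_self, List.count_append, hct, hcd]
          simp [hx2]
          omega
        rw [this, List.length_nil]
    have hx2v : ((x :: (t ++ d)).count x == 2) = (t.length + 1 == 2) := by
      rw [List.count_cons_self, List.count_append, hct, hcd]
    have ihd : (d.filter (fun n => d.count n == 2)).length = 2 * pairsRun d := ih hd
    rw [hRHS, hcons, List.filter_cons, List.filter_append, hfd, hx2v]
    by_cases hc : t.length + 1 = 2
    · rw [if_pos (by simpa using hc), if_pos hc, List.length_cons, List.length_append, hft,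
        if_pos hc, ihd]
      omega
    · rw [if_neg (by simpa using hc), if_neg hc, List.length_append, hft, if_neg hc, ihd]
      omega

theorem check_spec : Claim_equal_check := by
  unfold Claim_equal_check
  intro row _hdom _hpre
  unfold Spec_check
  have hperm : (PySem.List.sorted row (fun x => x) false).Perm row := PySem.List.sorted_perm row (fun x => x) false
  have hpw : (PySem.List.sorted row (fun x => x) false).Pairwise (· ≤ ·) := by
    have := PySem.List.sorted_pairwise (xs := row) (key := fun x => x)
    simpa using this
  have hfold : row.foldl (fun acc num => if row.count num == 2 then acc ++ [num] else acc) ([] : List Int)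
      = row.filter (fun num => row.count num == 2) := by
    rw [PySem.List.foldl_append_if_eq_filter]
    simp
  have hflen : (row.filter (fun num => row.count num == 2)).length
      = 2 * pairsRun (PySem.List.sorted row (fun x => x) false) := by
    have h1 : (row.filter (fun num => row.count num == 2)).length
        = ((PySem.List.sorted row (fun x => x) false).filter (fun num => row.count num == 2)).length :=
      (List.Perm.length_eq (hperm.filter _)).symm
    have h2 : (PySem.List.sorted row (fun x => x) false).filter (fun num => row.count num == 2)
        = (PySem.List.sorted row (fun x => x) false).filter
            (fun n => (PySem.List.sorted row (fun x => x) false).count n == 2) := by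
      apply List.filter_congr
      intro y _
      rw [hperm.count_eq]
    rw [h1, h2]
    exact pairsRun_key _ hpw
  have key : ((row.foldl (fun acc num => if row.count num == 2 then acc ++ [num] else acc) ([] : List Int)).length == 2)
      = (pairsRun (PySem.List.sorted row (fun x => x) false) == 1) := by
    rw [hfold, hflen]
    by_cases h : pairsRun (PySem.List.sorted row (fun x => x) false) = 1 <;> simp [h]
  show check row = check_alt row
  unfold check check_alt
  simp only [key]
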